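-- pv_equiv track=rewrite | github.com/komaksym/biggitybiggityO | src/scraping/leeetcode_solutions/solutions/number-of-divisible-triplet-sums.py | divisibleTripletCount
-- ===== SOURCE A (Python) =====
-- import collections
-- import collections
-- import collections
--
-- def divisibleTripletCount(nums, d):
--     """
--     :type nums: List[int]
--     :type d: int
--     :rtype: int
--     """
--     result = 0
--     for i in range(len(nums)):
--         cnt = collections.Counter()
--         for j in range(i+1, len(nums)):
--             result += cnt[nums[j]%d]
--             cnt[-(nums[i]+nums[j])%d] += 1
--     return result
-- ===== SOURCE B (Python) =====
-- def divisibleTripletCount(nums, d):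
--     """Single pass: keep a counter of residues seen (single) and a counter of
--     pair-sum residues over all earlier pairs (pair); each new element is queried
--     against pair once and extends pair via the residue counter, so the inner
--     scan over earlier elements is replaced by a scan over distinct residues."""
--     if len(nums) < 3:
--         return 0
--     result = 0
--     single = {}
--     pair = {}
--     for x in nums:
--         result += pair.get(-x % d, 0)
--         for r, c in list(single.items()):
--             k = (r + x) % d
--             pair[k] = pair.get(k, 0) + c
--         rx = x % d
--         single[rx] = single.get(rx, 0) + 1
--     return result
-- ===== Notes on version B (the rewrite author's own statement) =====
-- stated objective: faster
-- what changed: A restarts a fresh Counter for every first index i and rescans the whole suffix (nested index loops); B makes one pass keeping a residue counter and a pair-sum-residue counter, querying the pair counter once per element and extending it by iterating over the distinct residues seen so far, so the inner scan over earlier elements is replaced by a scan over distinct residues.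
import Mathlib
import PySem

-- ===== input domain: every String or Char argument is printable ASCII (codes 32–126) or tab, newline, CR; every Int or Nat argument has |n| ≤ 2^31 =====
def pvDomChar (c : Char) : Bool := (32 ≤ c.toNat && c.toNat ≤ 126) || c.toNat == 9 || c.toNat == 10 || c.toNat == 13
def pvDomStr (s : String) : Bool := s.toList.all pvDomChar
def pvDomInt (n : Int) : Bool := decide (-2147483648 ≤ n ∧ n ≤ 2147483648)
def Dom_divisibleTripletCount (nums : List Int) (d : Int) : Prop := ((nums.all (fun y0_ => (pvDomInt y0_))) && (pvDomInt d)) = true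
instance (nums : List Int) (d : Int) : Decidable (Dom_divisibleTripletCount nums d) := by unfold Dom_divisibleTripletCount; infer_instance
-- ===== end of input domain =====

-- B replaces A's per-i restarted pair scan (O(n^2) Counter rebuilds) by one pass keeping a
-- residue counter and a pair-sum-residue counter, so the inner scan runs over distinct residues.

-- ===== PORT A =====
def divisibleTripletCount (nums : List Int) (d : Int) : Int :=
  (PySem.List.pyRange 0 (PySem.List.len nums)).foldl (fun result i =>
    ((PySem.List.pyRange (i + 1) (PySem.List.len nums)).foldl
      (fun (st : Int × PySem.Dict Int Int) j =>
        (st.1 + st.2.getD (PySem.Int.mod (PySem.List.pyGetD nums j 0) d) 0,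
         st.2.modify (PySem.Int.mod (-(PySem.List.pyGetD nums i 0 + PySem.List.pyGetD nums j 0)) d) 0 (· + 1)))
      (result, PySem.Dict.empty)).1) 0

-- ===== PORT B =====
def divisibleTripletCount_alt (nums : List Int) (d : Int) : Int :=
  if PySem.List.len nums < 3 then 0
  else
    (nums.foldl
      (fun (st : Int × PySem.Dict Int Int × PySem.Dict Int Int) x =>
        let result := st.1 + st.2.2.getD (PySem.Int.mod (-x) d) 0
        let pair := st.2.1.items.foldl
          (fun (p : PySem.Dict Int Int) rc =>
            p.insert (PySem.Int.mod (rc.1 + x) d) (p.getD (PySem.Int.mod (rc.1 + x) d) 0 + rc.2))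
          st.2.2
        let rx := PySem.Int.mod x d
        let single := st.2.1.insert rx (st.2.1.getD rx 0 + 1)
        (result, single, pair))
      (0, PySem.Dict.empty, PySem.Dict.empty)).1

-- ===== PRECONDITION & SPEC =====
-- Pre_ excludes exactly the inputs where A raises ZeroDivisionError: d = 0 with at least two
-- elements (with fewer than two elements no '%' is ever evaluated and A returns 0).
def Pre_divisibleTripletCount (nums : List Int) (d : Int) : Prop := d ≠ 0 ∨ nums.length ≤ 1
instance (nums : List Int) (d : Int) : Decidable (Pre_divisibleTripletCount nums d) := by unfold Pre_divisibleTripletCount; infer_instance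
def pvWitness_divisibleTripletCount : List Int × Int := ([3, 3, 3, 1, 2], 3)

def Spec_divisibleTripletCount (nums : List Int) (d : Int) (out : Int) : Prop := out = divisibleTripletCount_alt nums d
instance (nums : List Int) (d : Int) (out : Int) : Decidable (Spec_divisibleTripletCount nums d out) := by unfold Spec_divisibleTripletCount; infer_instance

-- ===== CLAIM (what is proved, stated in full; the proofs are below) =====
def Claim_equal_divisibleTripletCount : Prop := ∀ (nums : List Int) (d : Int), Dom_divisibleTripletCount nums d → Pre_divisibleTripletCount nums d → Spec_divisibleTripletCount nums d (divisibleTripletCount nums d)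


-- ===== LEMMAS AND PROOFS =====


def cnt1 (d s : Int) (l : List Int) : Nat := l.countP (fun z => decide (d ∣ s + z))
-- Count of ordered pairs y before z in l with d ∣ s + y + z.
def cnt2 (d s : Int) : List Int → Nat
  | [] => 0
  | y :: l => cnt1 d (s + y) l + cnt2 d s l
-- Count of ordered triples x before y before z in l with d ∣ x + y + z.
def cnt3 (d : Int) : List Int → Nat
  | [] => 0
  | x :: l => cnt2 d x l + cnt3 d l
-- Count of pairs y before z in l whose pair-sum Python-residue is s.
def k2 (d s : Int) : List Int → Nat
  | [] => 0
  | y :: l => l.countP (fun z => PySem.Int.mod (y + z) d == s) + k2 d s l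
-- Mixed count: pairs (z from p, y from l) with d ∣ x + z + y.
def mixA (d x : Int) (p l : List Int) : Nat :=
  (l.map (fun y => p.countP (fun z => decide (d ∣ x + z + y)))).sum
-- The loop bodies of the two ports, named for the proofs (definitionally equal to the lambdas in the ports).
def bodyA (d xi : Int) (st : Int × PySem.Dict Int Int) (y : Int) : Int × PySem.Dict Int Int :=
  (st.1 + st.2.getD (PySem.Int.mod y d) 0,
   st.2.modify (PySem.Int.mod (-(xi + y)) d) 0 (· + 1))
def bodyB (d : Int) (st : Int × PySem.Dict Int Int × PySem.Dict Int Int) (x : Int) :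
    Int × PySem.Dict Int Int × PySem.Dict Int Int :=
  let result := st.1 + st.2.2.getD (PySem.Int.mod (-x) d) 0
  let pair := st.2.1.items.foldl
    (fun (p : PySem.Dict Int Int) rc =>
      p.insert (PySem.Int.mod (rc.1 + x) d) (p.getD (PySem.Int.mod (rc.1 + x) d) 0 + rc.2))
    st.2.2
  let rx := PySem.Int.mod x d
  let single := st.2.1.insert rx (st.2.1.getD rx 0 + 1)
  (result, single, pair)

lemma pymod_dvd_sub (a d : Int) : d ∣ a - PySem.Int.mod a d := by
  have h := Int.mul_fdiv_add_fmod a d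
  exact ⟨a.fdiv d, by simp only [PySem.Int.mod]; linarith⟩

lemma pymod_eq_iff {d : Int} (hd : d ≠ 0) (a b : Int) :
    PySem.Int.mod a d = PySem.Int.mod b d ↔ d ∣ a - b := by
  constructor
  · intro h
    have h1 := pymod_dvd_sub a d
    have h2 := pymod_dvd_sub b d
    have heq : a - b = (a - PySem.Int.mod a d) - (b - PySem.Int.mod b d) := by rw [h]; ring
    rw [heq]; exact dvd_sub h1 h2
  · intro h
    have h1 := pymod_dvd_sub a d
    have h2 := pymod_dvd_sub b d
    have hm : d ∣ PySem.Int.mod a d - PySem.Int.mod b d := by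
      have heq : PySem.Int.mod a d - PySem.Int.mod b d
          = (a - b) - (a - PySem.Int.mod a d) + (b - PySem.Int.mod b d) := by ring
      rw [heq]; exact dvd_add (dvd_sub h h1) h2
    rcases lt_or_gt_of_ne hd with hneg | hpos
    · have b1 := PySem.Int.mod_neg_bounds a hneg
      have b2 := PySem.Int.mod_neg_bounds b hneg
      have hm' : -d ∣ PySem.Int.mod a d - PySem.Int.mod b d := (neg_dvd).mpr hm
      have hz : PySem.Int.mod a d - PySem.Int.mod b d = 0 :=
        Int.eq_zero_of_abs_lt_dvd hm' (by rw [abs_lt]; omega)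
      omega
    · have b1n := PySem.Int.mod_nonneg a hpos
      have b1l := PySem.Int.mod_lt a hpos
      have b2n := PySem.Int.mod_nonneg b hpos
      have b2l := PySem.Int.mod_lt b hpos
      have hz : PySem.Int.mod a d - PySem.Int.mod b d = 0 :=
        Int.eq_zero_of_abs_lt_dvd hm (by rw [abs_lt]; omega)
      omega

lemma pymod_absorb {d : Int} (hd : d ≠ 0) (a b : Int) :
    PySem.Int.mod (PySem.Int.mod a d + b) d = PySem.Int.mod (a + b) d := by
  rw [pymod_eq_iff hd]
  have heq : PySem.Int.mod a d + b - (a + b) = -(a - PySem.Int.mod a d) := by ring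
  rw [heq]
  exact (dvd_neg).mpr (pymod_dvd_sub a d)

lemma cnt1_snoc (d s x : Int) (l : List Int) :
    cnt1 d s (l ++ [x]) = cnt1 d s l + (if d ∣ s + x then 1 else 0) := by
  simp [cnt1, List.countP_append, List.countP_cons]

lemma cnt1_cons (d s y : Int) (l : List Int) :
    cnt1 d s (y :: l) = cnt1 d s l + (if d ∣ s + y then 1 else 0) := by
  by_cases h : d ∣ s + y <;> simp [cnt1, h]

lemma cnt2_snoc (d s x : Int) (l : List Int) :
    cnt2 d s (l ++ [x]) = cnt2 d s l + cnt1 d (s + x) l := by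
  induction l generalizing s with
  | nil => simp [cnt2, cnt1]
  | cons y l ih =>
      have hc : s + y + x = s + x + y := by ring
      simp only [List.cons_append, cnt2, ih, cnt1_snoc, cnt1_cons, hc]
      omega

lemma cnt3_snoc (d x : Int) (l : List Int) :
    cnt3 d (l ++ [x]) = cnt3 d l + cnt2 d x l := by
  induction l with
  | nil => simp [cnt3, cnt2]
  | cons y l ih =>
      have hc : y + x = x + y := by ring
      simp only [List.cons_append, cnt3, ih, cnt2_snoc, cnt2, hc]
      omega

lemma k2_snoc (d s x : Int) (l : List Int) :
    k2 d s (l ++ [x]) = k2 d s l + l.countP (fun z => PySem.Int.mod (z + x) d == s) := by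
  induction l with
  | nil => simp [k2]
  | cons y l ih =>
      simp only [List.cons_append, k2, ih, List.countP_append, List.countP_cons]
      simp only [List.countP, List.countP.go]
      omega

lemma k2_modneg {d : Int} (hd : d ≠ 0) (x : Int) (p : List Int) :
    k2 d (PySem.Int.mod (-x) d) p = cnt2 d x p := by
  induction p with
  | nil => rfl
  | cons y l ih =>
      simp only [k2, cnt2, ih, cnt1]
      congr 1
      apply List.countP_congr
      intro z _
      simp only [beq_iff_eq, decide_eq_true_eq]
      rw [pymod_eq_iff hd]
      constructor
      · intro h
        have heq : x + y + z = y + z - -x := by ring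
        rw [heq]; exact h
      · intro h
        have heq : y + z - -x = x + y + z := by ring
        rw [heq]; exact h

lemma mixA_snoc (d x y : Int) (p l : List Int) :
    mixA d x (p ++ [y]) l = mixA d x p l + cnt1 d (x + y) l := by
  simp only [mixA, cnt1]
  induction l with
  | nil => simp
  | cons w l ih =>
      simp only [List.map_cons, List.sum_cons, List.countP_append, List.countP_cons]
      have hs := PySem.List.sum_map_ite_one_zero_nat' (fun i => d ∣ x + y + i) l
      by_cases h : d ∣ x + y + w <;> simp [h] <;> omega

lemma getD_foldl_insert_add (key : Int × Int → Int) (l : List (Int × Int))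
    (p : PySem.Dict Int Int) (s : Int) :
    (l.foldl (fun q rc => q.insert (key rc) (q.getD (key rc) 0 + rc.2)) p).getD s 0
      = p.getD s 0 + ((l.filter (fun rc => key rc == s)).map (·.2)).sum := by
  induction l generalizing p with
  | nil => simp
  | cons rc l ih =>
      simp only [List.foldl_cons, ih, List.filter_cons]
      by_cases h : key rc = s
      · simp [h]
        ring
      · have hb : (key rc == s) = false := by simp [h]
        have h' : s ≠ key rc := fun hh => h hh.symm
        simp [hb, PySem.Dict.getD_insert, h']

lemma sum_counter_filter (rs : List Int) (q : Int → Bool) :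
    ((((PySem.Dict.counter rs).items.filter (fun rc => q rc.1)).map (·.2)).sum : Int)
      = (rs.countP q : Int) := by
  rw [PySem.Dict.items_counter, List.filter_map, List.map_map]
  have hf1 : ((fun rc : Int × Int => q rc.1) ∘ fun k : Int => (k, (List.count k rs : Int))) = q := rfl
  have hf2 : ((fun x : Int × Int => x.2) ∘ fun k : Int => (k, (List.count k rs : Int)))
      = fun k => (List.count k rs : Int) := rfl
  rw [hf1, hf2]
  have hperm : (PySem.Set.ofList rs).Perm rs.dedup := by
    apply List.perm_of_nodup_nodup_toFinset_eq (PySem.Set.nodup_ofList rs) (List.nodup_dedup rs)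
    ext a
    simp [PySem.Set.mem_ofList, List.mem_dedup]
  rw [((hperm.filter q).map (fun k => (List.count k rs : Int))).sum_eq]
  rw [← List.sum_map_count_dedup_filter_eq_countP q rs, Nat.cast_list_sum, List.map_map]
  rfl

lemma foldB_inv {d : Int} (hd : d ≠ 0) (l : List Int) :
    ∀ (p : List Int) (st : Int × PySem.Dict Int Int × PySem.Dict Int Int),
    st.1 = (cnt3 d p : Int) →
    st.2.1 = PySem.Dict.counter (p.map (fun z => PySem.Int.mod z d)) →
    (∀ s, st.2.2.getD s 0 = (k2 d s p : Int)) →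
    (l.foldl (bodyB d) st).1 = (cnt3 d (p ++ l) : Int) := by
  induction l with
  | nil => intro p st h1 _ _; simpa using h1
  | cons x l ih =>
      intro p st h1 h2 h3
      rw [List.foldl_cons]
      have hres : (bodyB d st x).1 = (cnt3 d (p ++ [x]) : Int) := by
        simp only [bodyB, h1, h3, cnt3_snoc, ← k2_modneg hd x p]
        push_cast; ring
      have hsingle : (bodyB d st x).2.1
          = PySem.Dict.counter ((p ++ [x]).map (fun z => PySem.Int.mod z d)) := by
        simp only [bodyB, h2, List.map_append, List.map_cons, List.map_nil]
        rw [← PySem.Dict.foldl_insert_getD_add_one_eq_counter,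
            ← PySem.Dict.foldl_insert_getD_add_one_eq_counter, List.foldl_append]
        rfl
      have hpair : ∀ s, (bodyB d st x).2.2.getD s 0 = (k2 d s (p ++ [x]) : Int) := by
        intro s
        simp only [bodyB]
        rw [getD_foldl_insert_add (fun rc => PySem.Int.mod (rc.1 + x) d), h3, h2]
        have hsc := sum_counter_filter (p.map (fun z => PySem.Int.mod z d))
          (fun r => PySem.Int.mod (r + x) d == s)
        simp only [hsc, k2_snoc, List.countP_map]
        have hcong : List.countP ((fun r => PySem.Int.mod (r + x) d == s) ∘ fun z => PySem.Int.mod z d) p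
            = List.countP (fun z => PySem.Int.mod (z + x) d == s) p := by
          apply List.countP_congr
          intro z _
          simp only [Function.comp_apply, beq_iff_eq, pymod_absorb hd]
        rw [hcong]; push_cast; ring
      have := ih (p ++ [x]) (bodyB d st x) hres hsingle hpair
      rw [this, List.append_assoc]
      rfl

lemma foldA_inner {d : Int} (hd : d ≠ 0) (x : Int) (l : List Int) :
    ∀ (p : List Int) (acc : Int) (cnt : PySem.Dict Int Int),
    (∀ r, cnt.getD r 0 = (p.countP (fun z => PySem.Int.mod (-(x + z)) d == r) : Int)) →
    (l.foldl (bodyA d x) (acc, cnt)).1 = acc + (mixA d x p l : Int) + (cnt2 d x l : Int) := by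
  induction l with
  | nil => intro p acc cnt _; simp [mixA, cnt2]
  | cons y l ih =>
      intro p acc cnt h
      rw [List.foldl_cons]
      have hacc : (bodyA d x (acc, cnt) y).1
          = acc + (p.countP (fun z => decide (d ∣ x + z + y)) : Int) := by
        simp only [bodyA, h]
        congr 2
        apply List.countP_congr
        intro z _
        simp only [beq_iff_eq, decide_eq_true_eq]
        rw [pymod_eq_iff hd]
        constructor
        · intro hh
          have heq : x + z + y = -(-(x + z) - y) := by ring
          rw [heq]; exact (dvd_neg).mpr hh
        · intro hh
          have heq : -(x + z) - y = -(x + z + y) := by ring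
          rw [heq]; exact (dvd_neg).mpr hh
      have hcnt : ∀ r, (bodyA d x (acc, cnt) y).2.getD r 0
          = ((p ++ [y]).countP (fun z => PySem.Int.mod (-(x + z)) d == r) : Int) := by
        intro r
        show (cnt.modify (PySem.Int.mod (-(x + y)) d) 0 (· + 1)).getD r 0 = _
        rw [PySem.Dict.getD_modify, List.countP_append, List.countP_singleton]
        by_cases hr : r = PySem.Int.mod (-(x + y)) d
        · rw [if_pos hr, hr, h, beq_self_eq_true, if_pos rfl]
          push_cast; ring
        · have hy : (PySem.Int.mod (-(x + y)) d == r) = false := by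
            simp only [beq_eq_false_iff_ne, ne_eq]
            exact fun hh => hr hh.symm
          rw [if_neg hr, h, hy, if_neg Bool.false_ne_true]
          push_cast; ring
      have hmixA_cons : mixA d x p (y :: l)
          = p.countP (fun z => decide (d ∣ x + z + y)) + mixA d x p l := by
        simp [mixA]
      have hshape : bodyA d x (acc, cnt) y
          = ((bodyA d x (acc, cnt) y).1, (bodyA d x (acc, cnt) y).2) := rfl
      rw [hshape, ih (p ++ [y]) _ _ hcnt, hacc, mixA_snoc, hmixA_cons,
          show cnt2 d x (y :: l) = cnt1 d (x + y) l + cnt2 d x l from rfl]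
      push_cast; ring

lemma foldl_pyRange_shift (f : Int → Int → Int) (a b : Int) (init : Int) :
    (PySem.List.pyRange (a + 1) (b + 1)).foldl f init
      = (PySem.List.pyRange a b).foldl (fun acc i => f acc (i + 1)) init := by
  by_cases h : a < b
  · induction hn : (b - a).toNat generalizing a init with
    | zero => omega
    | succ n ihn =>
        rw [PySem.List.pyRange_one_cons (by omega : a + 1 < b + 1),
            PySem.List.pyRange_one_cons h, List.foldl_cons, List.foldl_cons]
        by_cases h2 : a + 1 < b
        · exact ihn (a + 1) (f init (a + 1)) h2 (by omega)
        · have hle1 : b + 1 ≤ a + 1 + 1 := by omega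
          have hle2 : b ≤ a + 1 := by omega
          have e1 : PySem.List.pyRange (a + 1 + 1) (b + 1) = [] := by simp [pysem, hle1]
          have e2 : PySem.List.pyRange (a + 1) b = [] := by simp [pysem, hle2]
          rw [e1, e2]
          rfl
  · have hle1 : b + 1 ≤ a + 1 := by omega
    have hle2 : b ≤ a := by omega
    have e1 : PySem.List.pyRange (a + 1) (b + 1) = [] := by simp [pysem, hle1]
    have e2 : PySem.List.pyRange a b = [] := by simp [pysem, hle2]
    rw [e1, e2]
    rfl

lemma cnt3_short (d : Int) (l : List Int) (h : l.length ≤ 2) : cnt3 d l = 0 := by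
  match l, h with
  | [], _ => rfl
  | [a], _ => rfl
  | [a, b], _ => simp [cnt3, cnt2, cnt1]

lemma outerSum (d : Int) (l : List Int) :
    ∀ init : Int,
    (PySem.List.pyRange 0 (PySem.List.len l)).foldl
      (fun acc i => acc + (cnt2 d (PySem.List.pyGetD l i 0) (List.drop (i + 1).toNat l) : Int))
      init = init + (cnt3 d l : Int) := by
  induction l with
  | nil => intro init; simp [cnt3, PySem.List.len, pysem]
  | cons x l ih =>
      intro init
      have hlen : PySem.List.len (x :: l) = (PySem.List.len l) + 1 := by
        simp only [PySem.List.len, List.length_cons]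
        push_cast; ring
      have hpos : (0 : Int) < PySem.List.len (x :: l) := by
        simp only [PySem.List.len, List.length_cons]
        positivity
      rw [PySem.List.pyRange_one_cons hpos, List.foldl_cons, hlen]
      rw [foldl_pyRange_shift]
      have hcong := PySem.List.foldl_congr_mem (PySem.List.pyRange 0 (PySem.List.len l))
        (fun acc i => acc + (cnt2 d (PySem.List.pyGetD (x :: l) (i + 1) 0)
          (List.drop (i + 1 + 1).toNat (x :: l)) : Int))
        (fun acc i => acc + (cnt2 d (PySem.List.pyGetD l i 0) (List.drop (i + 1).toNat l) : Int))
        (init + (cnt2 d (PySem.List.pyGetD (x :: l) 0 0) (List.drop ((0 : Int) + 1).toNat (x :: l)) : Int))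
        ?_
      · rw [hcong, ih]
        have hget0 : PySem.List.pyGetD (x :: l) 0 0 = x := by
          rw [PySem.List.pyGetD_of_nonneg _ _ (by omega)]; rfl
        have hdrop0 : List.drop ((0 : Int) + 1).toNat (x :: l) = l := by norm_num
        rw [hget0, hdrop0]
        simp [cnt3]
        ring
      · intro acc i hi
        have hi0 : 0 ≤ i := (PySem.List.mem_pyRange_one.mp hi).1
        have hget : PySem.List.pyGetD (x :: l) (i + 1) 0 = PySem.List.pyGetD l i 0 := by
          rw [PySem.List.pyGetD_of_nonneg _ _ (by omega), PySem.List.pyGetD_of_nonneg _ _ hi0]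
          have : (i + 1).toNat = i.toNat + 1 := by omega
          rw [this]; rfl
        have hdrop : List.drop (i + 1 + 1).toNat (x :: l) = List.drop (i + 1).toNat l := by
          have h1 : (i + 1 + 1).toNat = (i + 1).toNat + 1 := by omega
          rw [h1, List.drop_succ_cons]
        beta_reduce
        rw [hget, hdrop]

lemma A_eq_cnt3 {d : Int} (hd : d ≠ 0) (nums : List Int) :
    divisibleTripletCount nums d = (cnt3 d nums : Int) := by
  unfold divisibleTripletCount
  have hcong := PySem.List.foldl_congr_mem (PySem.List.pyRange 0 (PySem.List.len nums))
    (fun result i =>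
      ((PySem.List.pyRange (i + 1) (PySem.List.len nums)).foldl
        (fun (st : Int × PySem.Dict Int Int) j =>
          (st.1 + st.2.getD (PySem.Int.mod (PySem.List.pyGetD nums j 0) d) 0,
           st.2.modify (PySem.Int.mod (-(PySem.List.pyGetD nums i 0 + PySem.List.pyGetD nums j 0)) d) 0 (· + 1)))
        (result, PySem.Dict.empty)).1)
    (fun acc i => acc + (cnt2 d (PySem.List.pyGetD nums i 0) (List.drop (i + 1).toNat nums) : Int))
    0 ?_
  · rw [hcong]
    have := outerSum d nums 0
    rw [this]; ring
  · intro acc i hi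
    have hi0 : 0 ≤ i := (PySem.List.mem_pyRange_one.mp hi).1
    have hbr := PySem.List.foldl_pyRange_pyGetD nums 0 (bodyA d (PySem.List.pyGetD nums i 0))
      (acc, PySem.Dict.empty) (by omega : (0:Int) ≤ i + 1)
    simp only [bodyA] at hbr
    beta_reduce
    rw [hbr]
    have hinner := foldA_inner hd (PySem.List.pyGetD nums i 0) (List.drop (i + 1).toNat nums)
      [] acc PySem.Dict.empty (by intro r; simp)
    rw [hinner]
    simp [mixA]

lemma B_eq {d : Int} (hd : d ≠ 0) (nums : List Int) :
    divisibleTripletCount_alt nums d = (cnt3 d nums : Int) := by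
  unfold divisibleTripletCount_alt
  by_cases h : PySem.List.len nums < 3
  · rw [if_pos h]
    have hlen : nums.length ≤ 2 := by
      simp [PySem.List.len] at h; omega
    rw [cnt3_short d nums hlen]; rfl
  · rw [if_neg h]
    have := foldB_inv hd nums [] (0, PySem.Dict.empty, PySem.Dict.empty)
      (by rfl) (by rfl) (by intro s; simp [k2])
    simp only [List.nil_append] at this
    rw [← this]
    rfl



-- ===== VERDICT (by name: the statement is the Claim_ definition above) =====
theorem divisibleTripletCount_spec : Claim_equal_divisibleTripletCount := by
  intro nums d _ hpre
  unfold Spec_divisibleTripletCount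
  by_cases hd : d = 0
  · rcases hpre with hpre | hlen
    · exact absurd hd hpre
    · have hB : divisibleTripletCount_alt nums d = 0 := by
        unfold divisibleTripletCount_alt
        have hlt : PySem.List.len nums < 3 := by simp only [PySem.List.len]; omega
        rw [if_pos hlt]
      have hA : divisibleTripletCount nums d = 0 := by
        match nums, hlen with
        | [], _ =>
            unfold divisibleTripletCount
            rw [show PySem.List.pyRange 0 (PySem.List.len ([] : List Int)) = [] from rfl,
                List.foldl_nil]
        | [x], _ =>
            unfold divisibleTripletCount
            rw [show PySem.List.len [x] = 1 from rfl,
                show PySem.List.pyRange (0 : Int) 1 = [0] from rfl,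
                List.foldl_cons, List.foldl_nil,
                show PySem.List.pyRange ((0 : Int) + 1) 1 = [] from rfl, List.foldl_nil]
      rw [hA, hB]
  · rw [A_eq_cnt3 hd, B_eq hd]
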